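-- pv_equiv track=rewrite | github.com/codeforjapan/disinfo-relation-checker | src/disinfo_relation_checker/training_data.py | has_minimum_samples_per_class
-- ===== SOURCE A (Python) =====
-- from typing import Any
--
-- def has_minimum_samples_per_class(
--     data: list[dict[str, Any]], min_samples: int, label_key: str = "label"
-- ) -> bool:
--     """Check if each class has minimum number of samples."""
--     if not data:
--         return False
--
--     # Count labels
--     label_counts: dict[str, int] = {}
--     for item in data:
--         label = item[label_key]
--         label_counts[label] = label_counts.get(label, 0) + 1
--
--     return all(count >= min_samples for count in label_counts.values())
-- ===== SOURCE B (Python) =====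
-- def has_minimum_samples_per_class(data, min_samples, label_key="label"):
--     """Check if each class has minimum number of samples."""
--     if not data:
--         return False
--     distinct = {item[label_key] for item in data}
--     return all(
--         sum(1 for item in data if item[label_key] == label) >= min_samples
--         for label in distinct
--     )
-- ===== Notes on version B (the rewrite author's own statement) =====
-- stated objective: alternative
-- what changed: Replaces A's single-pass running-count dictionary with a set of distinct labels plus one full rescan of the data per distinct label; no counts are maintained.
import Mathlib
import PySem

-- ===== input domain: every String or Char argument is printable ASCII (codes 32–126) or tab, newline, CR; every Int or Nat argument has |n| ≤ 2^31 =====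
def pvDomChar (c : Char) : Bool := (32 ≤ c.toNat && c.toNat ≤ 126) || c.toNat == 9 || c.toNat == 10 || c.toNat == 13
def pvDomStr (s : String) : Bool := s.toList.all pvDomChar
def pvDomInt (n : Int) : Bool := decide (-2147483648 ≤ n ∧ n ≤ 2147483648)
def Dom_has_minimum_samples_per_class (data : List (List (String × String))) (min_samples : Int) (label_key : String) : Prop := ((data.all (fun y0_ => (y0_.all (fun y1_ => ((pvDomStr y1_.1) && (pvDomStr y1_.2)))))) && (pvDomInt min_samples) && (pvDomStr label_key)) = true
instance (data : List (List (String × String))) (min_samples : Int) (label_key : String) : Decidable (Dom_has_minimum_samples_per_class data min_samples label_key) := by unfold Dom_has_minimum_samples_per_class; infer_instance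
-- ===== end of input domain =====

-- B replaces A's running-count dictionary by a distinct-label set plus a full rescan per label (alternative decomposition, not faster).


-- item[label_key]: exact via Dict.get? inside Pre_ (key present); the "" default is never reached there
def pvGetLabel (label_key : String) (item : List (String × String)) : String :=
  ((PySem.Dict.mk item).get? label_key).getD ""

-- ===== PORT A =====
def has_minimum_samples_per_class (data : List (List (String × String))) (min_samples : Int) (label_key : String) : Bool :=
  if data.isEmpty then false
  else
    let label_counts : PySem.Dict String Int :=
      data.foldl (fun d item =>
        let label := pvGetLabel label_key item
        d.insert label (d.getD label 0 + 1)) PySem.Dict.empty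
    label_counts.values.all (fun count => decide (min_samples ≤ count))

-- ===== PORT B =====
def has_minimum_samples_per_class_alt (data : List (List (String × String))) (min_samples : Int) (label_key : String) : Bool :=
  if data.isEmpty then false
  else
    let distinct := PySem.Set.ofList (data.map (pvGetLabel label_key))
    distinct.all (fun label =>
      decide (min_samples ≤ ((data.filter (fun item => pvGetLabel label_key item == label)).length : Int)))

-- ===== PRECONDITION & SPEC =====
-- Pre_ excludes exactly the items missing label_key, on which Python A raises KeyError (so does B).
def Pre_has_minimum_samples_per_class (data : List (List (String × String))) (min_samples : Int) (label_key : String) : Prop :=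
  ∀ item ∈ data, label_key ∈ item.map Prod.fst
instance (data : List (List (String × String))) (min_samples : Int) (label_key : String) : Decidable (Pre_has_minimum_samples_per_class data min_samples label_key) := by unfold Pre_has_minimum_samples_per_class; infer_instance

def pvWitness_has_minimum_samples_per_class : (List (List (String × String))) × Int × String :=
  ([[("label", "a")], [("label", "b")], [("label", "a")]], 1, "label")

def Spec_has_minimum_samples_per_class (data : List (List (String × String))) (min_samples : Int) (label_key : String) (out : Bool) : Prop := out = has_minimum_samples_per_class_alt data min_samples label_key
instance (data : List (List (String × String))) (min_samples : Int) (label_key : String) (out : Bool) : Decidable (Spec_has_minimum_samples_per_class data min_samples label_key out) := by unfold Spec_has_minimum_samples_per_class; infer_instance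

-- ===== CLAIM (what is proved, stated in full; the proofs are below) =====
def Claim_equal_has_minimum_samples_per_class : Prop := ∀ (data : List (List (String × String))) (min_samples : Int) (label_key : String), Dom_has_minimum_samples_per_class data min_samples label_key → Pre_has_minimum_samples_per_class data min_samples label_key → Spec_has_minimum_samples_per_class data min_samples label_key (has_minimum_samples_per_class data min_samples label_key)

-- ===== LEMMAS AND PROOFS =====

-- A's nonempty branch equals B's: the counter's values are exactly the per-distinct-label counts.
theorem pv_counts_eq (data : List (List (String × String))) (min_samples : Int) (label_key : String) :
    (data.foldl (fun (d : PySem.Dict String Int) item =>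
        let label := pvGetLabel label_key item
        d.insert label (d.getD label 0 + 1)) PySem.Dict.empty).values.all
      (fun count => decide (min_samples ≤ count))
    = (PySem.Set.ofList (data.map (pvGetLabel label_key))).all (fun label =>
        decide (min_samples ≤ ((data.filter (fun item => pvGetLabel label_key item == label)).length : Int))) := by
  have hfold :
      (data.foldl (fun (d : PySem.Dict String Int) item =>
          let label := pvGetLabel label_key item
          d.insert label (d.getD label 0 + 1)) PySem.Dict.empty)
      = PySem.Dict.counter (data.map (pvGetLabel label_key)) := by
    rw [← PySem.Dict.foldl_insert_getD_add_one_eq_counter, List.foldl_map]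
  rw [hfold]
  have hvals : (PySem.Dict.counter (data.map (pvGetLabel label_key))).values
      = (PySem.Set.ofList (data.map (pvGetLabel label_key))).map
          (fun k => ((data.map (pvGetLabel label_key)).count k : Int)) := by
    show (PySem.Dict.counter (data.map (pvGetLabel label_key))).items.map Prod.snd = _
    rw [PySem.Dict.items_counter, List.map_map]
    simp [Function.comp]
  rw [hvals, List.all_map]
  apply List.all_congr
  case w => rfl
  intro label
  have hcount : ((data.map (pvGetLabel label_key)).count label : Nat)
      = (data.filter (fun item => pvGetLabel label_key item == label)).length := by
    simp [List.count_eq_countP, List.countP_map, ← List.countP_eq_length_filter]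
    rfl
  simp [Function.comp, ← hcount]

-- ===== VERDICT (by name: the statement is the Claim_ definition above) =====
theorem has_minimum_samples_per_class_spec : Claim_equal_has_minimum_samples_per_class := by
  intro data min_samples label_key _ _
  unfold Spec_has_minimum_samples_per_class has_minimum_samples_per_class has_minimum_samples_per_class_alt
  by_cases h : data.isEmpty
  · simp [h]
  · simp only [h]
    exact pv_counts_eq data min_samples label_key
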